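-- pv_equiv track=rewrite | github.com/neurologic-ai/vidaio-subnet | compress.py | _detect_stream_codecs
-- ===== SOURCE A (Python) =====
-- from typing import Dict, Any, List, Optional, Tuple
--
-- def _detect_stream_codecs(info: Dict[str, Any]) -> Dict[str, Optional[str]]:
--     ret = {'video': None, 'audio': None}
--     try:
--         for s in info.get('streams', []):
--             if s.get('codec_type') == 'video' and not ret['video']:
--                 ret['video'] = s.get('codec_name', '').lower()
--             if s.get('codec_type') == 'audio' and not ret['audio']:
--                 ret['audio'] = s.get('codec_name', '').lower()
--     except Exception:
--         pass
--     return ret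
-- ===== SOURCE B (Python) =====
-- def _detect_stream_codecs(info):
--     ret = {'video': None, 'audio': None}
--     try:
--         streams = info.get('streams', [])
--         for kind in ('video', 'audio'):
--             names = [s.get('codec_name', '').lower() for s in streams
--                      if s.get('codec_type') == kind]
--             if names:
--                 ret[kind] = next((n for n in names if n), '')
--     except Exception:
--         pass
--     return ret
-- ===== Notes on version B (the rewrite author's own statement) =====
-- stated objective: simpler
-- what changed: Replaces the single interleaved loop with truthiness-guarded mutable state by a per-kind pass: filter the streams of each kind, take the first non-empty lowercased codec_name (or '' if the kind occurs with only empty names, None if absent).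
import Mathlib
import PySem

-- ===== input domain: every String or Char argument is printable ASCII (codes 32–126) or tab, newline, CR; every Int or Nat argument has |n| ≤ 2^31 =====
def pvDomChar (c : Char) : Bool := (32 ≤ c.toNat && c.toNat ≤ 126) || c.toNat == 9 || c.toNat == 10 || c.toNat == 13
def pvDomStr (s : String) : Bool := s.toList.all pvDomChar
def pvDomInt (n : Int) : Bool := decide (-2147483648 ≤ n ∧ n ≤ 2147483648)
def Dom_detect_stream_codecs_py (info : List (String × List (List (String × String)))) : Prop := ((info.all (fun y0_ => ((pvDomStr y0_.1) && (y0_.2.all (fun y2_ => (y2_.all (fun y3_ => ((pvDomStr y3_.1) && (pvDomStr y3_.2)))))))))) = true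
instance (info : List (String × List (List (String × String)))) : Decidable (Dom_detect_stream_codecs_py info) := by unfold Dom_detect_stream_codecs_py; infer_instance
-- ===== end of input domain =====

-- B replaces A's single interleaved loop over streams (mutable truthiness-guarded state)
-- by one independent pass per kind ('video','audio'); objective: simpler decomposition.


-- shared dict primitives (s.get(k) / s.get(k, '')) on a stream dict
def sGet? (s : List (String × String)) (k : String) : Option String :=
  (PySem.Dict.mk s).get? k
def sGetD (s : List (String × String)) (k : String) : String :=
  (PySem.Dict.mk s).getD k ""
-- Python truthiness of ret['video']/ret['audio'] (None or '' is falsy)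
def pyFalsy (o : Option String) : Bool := o == none || o == some ""

-- ===== PORT A =====
-- loop body: the two 'if's of A, in order, over the state (ret['video'], ret['audio'])
def aStep (r : Option String × Option String) (s : List (String × String)) :
    Option String × Option String :=
  let r := if (sGet? s "codec_type" == some "video") && pyFalsy r.1 then
             (some (PySem.Str.lower (sGetD s "codec_name")), r.2) else r
  if (sGet? s "codec_type" == some "audio") && pyFalsy r.2 then
    (r.1, some (PySem.Str.lower (sGetD s "codec_name"))) else r

def detect_stream_codecs_py (info : List (String × List (List (String × String)))) :
    List (String × Option String) :=
  let streams := (PySem.Dict.mk info).getD "streams" []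
  let ret := streams.foldl aStep (none, none)
  [("video", ret.1), ("audio", ret.2)]

-- ===== PORT B =====
-- per-kind pass: lowercased names of matching streams; first truthy one, '' if none, None if no stream
def bPick (streams : List (List (String × String))) (kind : String) : Option String :=
  let names := (streams.filter (fun s => sGet? s "codec_type" == some kind)).map
      (fun s => PySem.Str.lower (sGetD s "codec_name"))
  if names.isEmpty then none
  else some ((names.find? (fun n => n != "")).getD "")

def detect_stream_codecs_py_alt (info : List (String × List (List (String × String)))) :
    List (String × Option String) :=
  let streams := (PySem.Dict.mk info).getD "streams" []
  [("video", bPick streams "video"), ("audio", bPick streams "audio")]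

-- ===== PRECONDITION & SPEC =====
def Spec_detect_stream_codecs_py (info : List (String × List (List (String × String)))) (out : List (String × Option String)) : Prop := out = detect_stream_codecs_py_alt info
instance (info : List (String × List (List (String × String)))) (out : List (String × Option String)) : Decidable (Spec_detect_stream_codecs_py info out) := by unfold Spec_detect_stream_codecs_py; infer_instance

-- ===== CLAIM (what is proved, stated in full; the proofs are below) =====
def Claim_equal_detect_stream_codecs_py : Prop := ∀ (info : List (String × List (List (String × String)))), Dom_detect_stream_codecs_py info → Spec_detect_stream_codecs_py info (detect_stream_codecs_py info)

-- ===== LEMMAS AND PROOFS =====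

-- the per-kind update A's loop performs on one component of its state
def gK (kind : String) (o : Option String) (s : List (String × String)) : Option String :=
  if (sGet? s "codec_type" == some kind) && pyFalsy o then
    some (PySem.Str.lower (sGetD s "codec_name")) else o

theorem aStep_eq (a b : Option String) (s : List (String × String)) :
    aStep (a, b) s = (gK "video" a s, gK "audio" b s) := by
  simp only [aStep, gK]
  split_ifs <;> rfl

theorem foldl_aStep_pair (streams : List (List (String × String))) :
    ∀ (a b : Option String),
      streams.foldl aStep (a, b) =
        (streams.foldl (gK "video") a, streams.foldl (gK "audio") b) := by
  induction streams with
  | nil => intro a b; rfl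
  | cons s t ih => intro a b; simp only [List.foldl_cons, aStep_eq, ih]

theorem foldl_gK_frozen (kind : String) (streams : List (List (String × String)))
    (n : String) (hn : n ≠ "") : streams.foldl (gK kind) (some n) = some n := by
  induction streams with
  | nil => rfl
  | cons s t ih =>
    have h : gK kind (some n) s = some n := by
      simp [gK, pyFalsy, hn]
    simp only [List.foldl_cons, h, ih]

theorem foldl_gK_empty (kind : String) (streams : List (List (String × String))) :
    streams.foldl (gK kind) (some "") =
      some ((((streams.filter (fun s => sGet? s "codec_type" == some kind)).map
        (fun s => PySem.Str.lower (sGetD s "codec_name"))).find? (fun n => n != "")).getD "") := by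
  induction streams with
  | nil => rfl
  | cons s t ih =>
    by_cases hty : (sGet? s "codec_type" == some kind) = true
    · have hstep : gK kind (some "") s = some (PySem.Str.lower (sGetD s "codec_name")) := by
        simp [gK, pyFalsy, hty]
      by_cases hln : PySem.Str.lower (sGetD s "codec_name") = ""
      · simp only [List.foldl_cons, hstep, hln, ih, List.filter_cons, hty, if_pos,
          List.map_cons, List.find?]
        simp
      · simp only [List.foldl_cons, hstep, foldl_gK_frozen kind t _ hln,
          List.filter_cons, hty, if_pos, List.map_cons, List.find?]
        have h' : (PySem.Str.lower (sGetD s "codec_name") != "") = true := by simp [hln]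
        simp [h']
    · have hstep : gK kind (some "") s = some "" := by simp [gK, hty]
      simp only [List.foldl_cons, hstep, ih, List.filter_cons, hty]
      simp

theorem foldl_gK_none (kind : String) (streams : List (List (String × String))) :
    streams.foldl (gK kind) none = bPick streams kind := by
  induction streams with
  | nil => rfl
  | cons s t ih =>
    by_cases hty : (sGet? s "codec_type" == some kind) = true
    · have hstep : gK kind none s = some (PySem.Str.lower (sGetD s "codec_name")) := by
        simp [gK, pyFalsy, hty]
      by_cases hln : PySem.Str.lower (sGetD s "codec_name") = ""
      · simp only [List.foldl_cons, hstep, hln, foldl_gK_empty kind t, bPick,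
          List.filter_cons, hty, if_pos, List.map_cons]
        simp
      · simp only [List.foldl_cons, hstep, foldl_gK_frozen kind t _ hln, bPick,
          List.filter_cons, hty, if_pos, List.map_cons]
        have h' : (PySem.Str.lower (sGetD s "codec_name") != "") = true := by simp [hln]
        simp [h']
    · have hstep : gK kind none s = none := by simp [gK, hty]
      simp only [List.foldl_cons, hstep, ih, bPick, List.filter_cons, hty]
      simp

-- ===== VERDICT (by name: the statement is the Claim_ definition above) =====
theorem detect_stream_codecs_py_spec : Claim_equal_detect_stream_codecs_py := by
  intro info _
  unfold Spec_detect_stream_codecs_py detect_stream_codecs_py detect_stream_codecs_py_alt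
  simp only [foldl_aStep_pair, foldl_gK_none]
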